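-- pv_equiv track=rewrite | github.com/PatPatDango/reaction-kernels | scripts/wp3/wp3_loader.py | choose_subsets_with_at_least_k_common_classes
-- ===== SOURCE A (Python) =====
-- def choose_subsets_with_at_least_k_common_classes(index, ref_classes, k=2, min_per_class=20):
--     ref = set(ref_classes)
--     good = []
--     for sid, cnt in index.items():
--         present = {c for c, n in cnt.items() if n >= min_per_class}
--         if len(present & ref) >= k:
--             good.append(sid)
--     return sorted(good)
-- ===== SOURCE B (Python) =====
-- def choose_subsets_with_at_least_k_common_classes(index, ref_classes, k=2, min_per_class=20):
--     # Inverted traversal: class-major accumulation into a hit counter per subset id,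
--     # instead of building per-subset frequent-class sets and intersecting with ref.
--     hits = dict.fromkeys(index, 0)
--     for c in dict.fromkeys(ref_classes):
--         for sid, cnt in index.items():
--             if c in cnt and cnt[c] >= min_per_class:
--                 hits[sid] += 1
--     return sorted(sid for sid, h in hits.items() if h >= k)
-- ===== Notes on version B (the rewrite author's own statement) =====
-- stated objective: alternative
-- what changed: B inverts the traversal: instead of building each subset's set of frequent classes and intersecting it with the ref set, it loops class-major over the deduplicated ref classes, accumulating a per-subset hit counter dict initialised from the index keys, and finally filters and sorts that counter's items.
import Mathlib
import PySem

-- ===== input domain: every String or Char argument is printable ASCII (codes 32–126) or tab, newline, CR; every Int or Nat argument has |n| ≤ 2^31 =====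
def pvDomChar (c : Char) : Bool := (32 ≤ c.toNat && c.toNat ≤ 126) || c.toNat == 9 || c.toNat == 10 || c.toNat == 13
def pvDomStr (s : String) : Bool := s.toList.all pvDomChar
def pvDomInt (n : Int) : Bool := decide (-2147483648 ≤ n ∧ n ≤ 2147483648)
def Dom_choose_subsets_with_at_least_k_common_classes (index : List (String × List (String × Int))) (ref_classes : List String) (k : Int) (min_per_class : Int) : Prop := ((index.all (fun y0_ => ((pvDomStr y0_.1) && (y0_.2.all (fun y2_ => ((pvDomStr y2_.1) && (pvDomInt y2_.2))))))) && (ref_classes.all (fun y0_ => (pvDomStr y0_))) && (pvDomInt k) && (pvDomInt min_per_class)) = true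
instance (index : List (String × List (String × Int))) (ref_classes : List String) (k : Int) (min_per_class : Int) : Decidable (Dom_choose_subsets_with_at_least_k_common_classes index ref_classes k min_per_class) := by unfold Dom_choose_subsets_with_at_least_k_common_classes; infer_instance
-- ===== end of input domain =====

-- B inverts the traversal: class-major accumulation into a per-subset hit counter dict instead of per-subset frequent-class sets intersected with ref; alternative structure, same cost class.

-- ===== PORT A =====
def choose_subsets_with_at_least_k_common_classes (index : List (String × List (String × Int))) (ref_classes : List String) (k : Int) (min_per_class : Int) : List String :=
  let d := PySem.Dict.ofList index
  let ref : PySem.Set String := PySem.Set.ofList ref_classes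
  let good := d.items.foldl (fun good p =>
      let cnt := PySem.Dict.ofList p.2
      let present : PySem.Set String :=
        PySem.Set.ofList ((cnt.items.filter (fun q => decide (min_per_class ≤ q.2))).map (·.1))
      if k ≤ ((PySem.Set.inter present ref).length : Int) then good ++ [p.1] else good) []
  PySem.List.sorted good (fun x => x) false

-- ===== PORT B =====
-- B-side helper: Python's 'c in cnt and cnt[c] >= min_per_class'
def pvFrequentIn (cnt : PySem.Dict String Int) (min_per_class : Int) (c : String) : Bool :=
  (cnt.get? c).any (fun n => decide (min_per_class ≤ n))

def choose_subsets_with_at_least_k_common_classes_alt (index : List (String × List (String × Int))) (ref_classes : List String) (k : Int) (min_per_class : Int) : List String :=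
  let d := PySem.Dict.ofList index
  -- hits = dict.fromkeys(index, 0)
  let hits0 : PySem.Dict String Int := PySem.Dict.ofList (d.keys.map (fun s => (s, (0 : Int))))
  -- for c in dict.fromkeys(ref_classes): for sid, cnt in index.items(): if c in cnt and cnt[c] >= min_per_class: hits[sid] += 1
  let hits := (PySem.List.dedup ref_classes).foldl (fun h c =>
      d.items.foldl (fun h p =>
        if pvFrequentIn (PySem.Dict.ofList p.2) min_per_class c then h.modify p.1 0 (· + 1) else h) h) hits0
  -- return sorted(sid for sid, h in hits.items() if h >= k)
  PySem.List.sorted ((hits.items.filter (fun q => decide (k ≤ q.2))).map (fun q => q.1)) (fun x => x) false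

-- ===== PRECONDITION & SPEC =====
def Spec_choose_subsets_with_at_least_k_common_classes (index : List (String × List (String × Int))) (ref_classes : List String) (k : Int) (min_per_class : Int) (out : List String) : Prop := out = choose_subsets_with_at_least_k_common_classes_alt index ref_classes k min_per_class
instance (index : List (String × List (String × Int))) (ref_classes : List String) (k : Int) (min_per_class : Int) (out : List String) : Decidable (Spec_choose_subsets_with_at_least_k_common_classes index ref_classes k min_per_class out) := by unfold Spec_choose_subsets_with_at_least_k_common_classes; infer_instance

-- ===== CLAIM (what is proved, stated in full; the proofs are below) =====
def Claim_equal_choose_subsets_with_at_least_k_common_classes : Prop := ∀ (index : List (String × List (String × Int))) (ref_classes : List String) (k : Int) (min_per_class : Int), Dom_choose_subsets_with_at_least_k_common_classes index ref_classes k min_per_class → Spec_choose_subsets_with_at_least_k_common_classes index ref_classes k min_per_class (choose_subsets_with_at_least_k_common_classes index ref_classes k min_per_class)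

-- ===== LEMMAS AND PROOFS =====

-- the sids incremented by one outer pass for class c
def pvL (min_per_class : Int) (items : List (String × List (String × Int))) (c : String) : List String :=
  (items.filter (fun p => pvFrequentIn (PySem.Dict.ofList p.2) min_per_class c)).map (fun p => p.1)

-- one outer pass of B's loop
def pvInner (min_per_class : Int) (items : List (String × List (String × Int))) (h : PySem.Dict String Int) (c : String) : PySem.Dict String Int :=
  items.foldl (fun h p =>
    if pvFrequentIn (PySem.Dict.ofList p.2) min_per_class c then h.modify p.1 0 (· + 1) else h) h

theorem pv_inner_eq (m : Int) (items : List (String × List (String × Int))) (h : PySem.Dict String Int) (c : String) :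
    pvInner m items h c = (pvL m items c).foldl (fun h x => h.modify x 0 (· + 1)) h := by
  unfold pvInner pvL
  rw [PySem.List.foldl_if_eq_foldl_filter, List.foldl_map]

theorem pv_update_subset (l : List String) (s : PySem.Set String) (hsub : ∀ x ∈ l, x ∈ s) :
    PySem.Set.update s l = s := by
  induction l generalizing s with
  | nil => exact PySem.Set.update_nil s
  | cons x xs ih =>
    rw [PySem.Set.update_cons, PySem.Set.add_of_mem (hsub x (by simp))]
    exact ih s (fun y hy => hsub y (by simp [hy]))

theorem pv_loop_keys (m : Int) (items : List (String × List (String × Int))) (cs : List String) :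
    ∀ h : PySem.Dict String Int, h.keys = items.map (fun p => p.1) →
      (cs.foldl (pvInner m items) h).keys = items.map (fun p => p.1) := by
  induction cs with
  | nil => intro h hk; simpa using hk
  | cons c cs ih =>
    intro h hk
    rw [List.foldl_cons]
    refine ih _ ?_
    rw [pv_inner_eq, PySem.Dict.keys_foldl_modify (pvL m items c) 0 (fun _ _ => (· + 1)) h, hk]
    refine pv_update_subset _ _ ?_
    intro x hx
    unfold pvL at hx
    rcases List.mem_map.1 hx with ⟨p, hp, rfl⟩
    exact List.mem_map.2 ⟨p, (List.mem_filter.1 hp).1, rfl⟩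

theorem pv_loop_getD (m : Int) (items : List (String × List (String × Int))) (cs : List String) :
    ∀ (h : PySem.Dict String Int) (sid : String),
      (cs.foldl (pvInner m items) h).getD sid 0
        = h.getD sid 0 + (cs.map (fun c => ((pvL m items c).count sid : Int))).sum := by
  induction cs with
  | nil => intro h sid; simp
  | cons c cs ih =>
    intro h sid
    rw [List.foldl_cons, ih, pv_inner_eq,
      PySem.Dict.getD_foldl_modify_add_one (pvL m items c) h sid]
    simp [add_assoc]

-- with unique firsts, the number of qualifying items keyed sid is decided by sid's own item
theorem pv_count_unique {β : Type} (q : String × β → Bool) :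
    ∀ (l : List (String × β)), (l.map Prod.fst).Nodup →
      ∀ a b, (a, b) ∈ l →
        ((l.filter q).map Prod.fst).count a = if q (a, b) then 1 else 0 := by
  intro l
  induction l with
  | nil => intro _ a b hab; simp at hab
  | cons p t ih =>
    intro hnd a b hab
    have hnd' := hnd
    rw [List.map_cons, List.nodup_cons] at hnd'
    have hzero : ∀ (x : String), x ∉ t.map Prod.fst → ((t.filter q).map Prod.fst).count x = 0 := by
      intro x hx
      refine List.count_eq_zero.2 ?_
      intro hmem
      rcases List.mem_map.1 hmem with ⟨r, hr, rfl⟩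
      exact hx (List.mem_map.2 ⟨r, (List.mem_filter.1 hr).1, rfl⟩)
    rcases List.mem_cons.1 hab with heq | hmem
    · -- (a, b) is the head
      have hb : p = (a, b) := by rw [← heq]
      subst hb
      by_cases hq : q (a, b) = true
      · simp [hq, hzero a hnd'.1]
      · have hq' : q (a, b) = false := by simpa using hq
        simp [hq', hzero a hnd'.1]
    · -- (a, b) is in the tail, so a ≠ p.1
      have hne : p.1 ≠ a := by
        intro hcontra
        exact hnd'.1 (hcontra ▸ List.mem_map.2 ⟨(a, b), hmem, rfl⟩)
      have htail := ih hnd'.2 a b hmem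
      by_cases hq : q p = true
      · simp only [List.filter_cons, hq, if_pos trivial, List.map_cons]
        rw [List.count_cons_of_ne hne]
        exact htail
      · have hq' : q p = false := by simpa using hq
        simp [hq', htail]

-- membership in A's 'present' set is exactly B's per-class test
theorem pv_mem_present_iff (cntL : List (String × Int)) (m : Int) (c : String) :
    c ∈ PySem.Set.ofList (((PySem.Dict.ofList cntL).items.filter (fun q => decide (m ≤ q.2))).map (fun q => q.1))
      ↔ pvFrequentIn (PySem.Dict.ofList cntL) m c = true := by
  rw [PySem.Set.mem_ofList]
  unfold pvFrequentIn
  constructor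
  · intro hc
    rcases List.mem_map.1 hc with ⟨r, hr, rfl⟩
    rcases List.mem_filter.1 hr with ⟨hri, hrle⟩
    have hget : (PySem.Dict.ofList cntL).get? r.1 = some r.2 :=
      PySem.Dict.get?_of_mem_items _ (by simpa using hri) (PySem.Dict.nodup_keys_ofList cntL)
    rw [hget]
    simpa using hrle
  · intro hq
    cases hget : (PySem.Dict.ofList cntL).get? c with
    | none => rw [hget] at hq; simp at hq
    | some n =>
      rw [hget] at hq
      have hn : decide (m ≤ n) = true := by simpa using hq
      have hmem : (c, n) ∈ (PySem.Dict.ofList cntL).items :=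
        PySem.Dict.mem_items_of_get?_eq_some _ hget
      exact List.mem_map.2 ⟨(c, n), List.mem_filter.2 ⟨hmem, hn⟩, rfl⟩

-- A's |present ∩ ref| = number of distinct ref classes passing B's test
theorem pv_inter_len (cntL : List (String × Int)) (ref_classes : List String) (m : Int) :
    ((PySem.Set.inter
        (PySem.Set.ofList (((PySem.Dict.ofList cntL).items.filter (fun q => decide (m ≤ q.2))).map (fun q => q.1)))
        (PySem.Set.ofList ref_classes)).length : Int)
      = ((PySem.Set.ofList ref_classes).countP (fun c => pvFrequentIn (PySem.Dict.ofList cntL) m c) : Int) := by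
  have hperm : (PySem.Set.inter
      (PySem.Set.ofList (((PySem.Dict.ofList cntL).items.filter (fun q => decide (m ≤ q.2))).map (fun q => q.1)))
      (PySem.Set.ofList ref_classes)).Perm
      ((PySem.Set.ofList ref_classes).filter (fun c => pvFrequentIn (PySem.Dict.ofList cntL) m c)) := by
    rw [List.perm_ext_iff_of_nodup
      (PySem.Set.nodup_inter _ _ (PySem.Set.nodup_ofList _))
      ((PySem.Set.nodup_ofList ref_classes).filter _)]
    intro x
    rw [PySem.Set.mem_inter, List.mem_filter, pv_mem_present_iff, and_comm]
  rw [List.countP_eq_length_filter]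
  exact_mod_cast congrArg Nat.cast hperm.length_eq

theorem choose_spec_aux (index : List (String × List (String × Int))) (ref_classes : List String) (k : Int) (min_per_class : Int) :
    choose_subsets_with_at_least_k_common_classes index ref_classes k min_per_class
      = choose_subsets_with_at_least_k_common_classes_alt index ref_classes k min_per_class := by
  unfold choose_subsets_with_at_least_k_common_classes choose_subsets_with_at_least_k_common_classes_alt
  dsimp only
  set d := PySem.Dict.ofList index with hd
  have hnd : d.keys.Nodup := PySem.Dict.nodup_keys_ofList index
  -- hits0 facts
  have hitems0 : (PySem.Dict.ofList (d.keys.map (fun s => (s, (0 : Int))))).items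
      = d.keys.map (fun s => (s, (0 : Int))) := by
    show (List.foldl (fun acc p => acc.insert p.1 p.2) PySem.Dict.empty (d.keys.map (fun s => (s, (0 : Int))))).items = _
    have := PySem.Dict.items_foldl_insert_fresh (d.keys.map (fun s => (s, (0 : Int))))
      (fun p => p.1) (fun p => p.2) PySem.Dict.empty
      (fun a _ => PySem.Dict.contains_empty a.1) (by simpa [List.map_map, Function.comp_def] using hnd)
    simpa using this
  have hkeys0 : (PySem.Dict.ofList (d.keys.map (fun s => (s, (0 : Int))))).keys = d.keys := by
    show ((PySem.Dict.ofList (d.keys.map (fun s => (s, (0 : Int))))).items.map (fun p => p.1)) = d.keys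
    rw [hitems0, List.map_map]; simp [Function.comp_def]
  have hgetD0 : ∀ s ∈ d.keys, (PySem.Dict.ofList (d.keys.map (fun s => (s, (0 : Int))))).getD s 0 = 0 := by
    intro s hs
    refine PySem.Dict.getD_of_mem_items _ ?_ (by rw [hkeys0]; exact hnd) 0
    rw [hitems0]; exact List.mem_map.2 ⟨s, hs, rfl⟩
  -- the double loop is foldl of pvInner
  rw [PySem.List.dedup_eq_ofList]
  set refd := PySem.Set.ofList ref_classes with hrefd
  have hloop : (refd.foldl (fun h c =>
      d.items.foldl (fun h p =>
        if pvFrequentIn (PySem.Dict.ofList p.2) min_per_class c then h.modify p.1 0 (· + 1) else h) h)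
      (PySem.Dict.ofList (d.keys.map (fun s => (s, (0 : Int))))))
      = refd.foldl (pvInner min_per_class d.items) (PySem.Dict.ofList (d.keys.map (fun s => (s, (0 : Int))))) := rfl
  rw [hloop]
  set hits := refd.foldl (pvInner min_per_class d.items) (PySem.Dict.ofList (d.keys.map (fun s => (s, (0 : Int))))) with hhits
  have hkeys : hits.keys = d.items.map (fun p => p.1) := by
    rw [hhits]
    exact pv_loop_keys min_per_class d.items refd _ (by rw [hkeys0]; rfl)
  have hkeys' : hits.keys = d.keys := hkeys
  have hndh : hits.keys.Nodup := by rw [hkeys']; exact hnd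
  -- the per-sid value of hits for a sid present in d
  have hval : ∀ p ∈ d.items, hits.getD p.1 0
      = (refd.countP (fun c => pvFrequentIn (PySem.Dict.ofList p.2) min_per_class c) : Int) := by
    intro p hp
    have hp1 : p.1 ∈ d.keys := List.mem_map.2 ⟨p, hp, rfl⟩
    rw [hhits, pv_loop_getD, hgetD0 p.1 hp1, zero_add]
    have hcnt : ∀ c, ((pvL min_per_class d.items c).count p.1 : Int)
        = (if pvFrequentIn (PySem.Dict.ofList p.2) min_per_class c then (1 : Int) else 0) := by
      intro c
      unfold pvL
      have := pv_count_unique (fun r : String × List (String × Int) =>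
          pvFrequentIn (PySem.Dict.ofList r.2) min_per_class c) d.items hnd p.1 p.2 (by simpa using hp)
      rw [this]
      by_cases hq : pvFrequentIn (PySem.Dict.ofList p.2) min_per_class c = true
      · simp [hq]
      · simp [Bool.eq_false_iff.2 hq]
    calc (refd.map (fun c => ((pvL min_per_class d.items c).count p.1 : Int))).sum
        = (refd.map (fun c => if pvFrequentIn (PySem.Dict.ofList p.2) min_per_class c then (1 : Int) else 0)).sum := by
          exact congrArg List.sum (List.map_congr_left (fun c _ => hcnt c))
      _ = (refd.countP (fun c => pvFrequentIn (PySem.Dict.ofList p.2) min_per_class c) : Int) :=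
          PySem.List.sum_map_ite_one_zero _ refd
  -- rewrite A's fold as filter+map
  rw [PySem.List.foldl_append_ite
        (fun p : String × List (String × Int) =>
          k ≤ ((PySem.Set.inter
                (PySem.Set.ofList (((PySem.Dict.ofList p.2).items.filter
                    (fun q => decide (min_per_class ≤ q.2))).map (fun q => q.1)))
                (PySem.Set.ofList ref_classes)).length : Int))
        (fun p => p.1), List.nil_append]
  -- rewrite B's list as filter+map over d.items
  have hbitems : hits.items = (d.items.map (fun p => p.1)).map (fun s => (s, hits.getD s 0)) := by
    rw [← hkeys]
    exact PySem.Dict.items_eq_map_keys hits hndh 0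
  have hB : (hits.items.filter (fun q => decide (k ≤ q.2))).map (fun q => q.1)
      = (d.items.filter (fun p => decide (k ≤ hits.getD p.1 0))).map (fun p => p.1) := by
    simp [hbitems, List.filter_map, List.map_map, Function.comp_def]
  rw [hB]
  refine congrArg (fun l => PySem.List.sorted l (fun x => x) false)
    (congrArg (List.map (fun p : String × List (String × Int) => p.1)) (List.filter_congr ?_))
  intro p hp
  rw [hval p hp, pv_inter_len p.2 ref_classes min_per_class, ← hrefd]

-- ===== VERDICT (by name: the statement is the Claim_ definition above) =====
theorem choose_subsets_with_at_least_k_common_classes_spec : Claim_equal_choose_subsets_with_at_least_k_common_classes := by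
  intro index ref_classes k min_per_class _
  exact choose_spec_aux index ref_classes k min_per_class
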